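-- pv_equiv track=rewrite | github.com/iamlucasmateo/fcc-fast-api | src/repository/posts.py | arr2string
-- ===== SOURCE A (Python) =====
-- from typing import Dict, Any, Optional, List, Iterable, Tuple
--
-- def arr2string(arr: List[str],
--                before: str = '',
--                after: str = '',
--                init: str = '',
--                end: str = ''):
--     result = init
--     for item in arr:
--         result += before + item + after
--     result += end
--     return result
-- ===== SOURCE B (Python) =====
-- def arr2string(arr, before='', after='', init='', end=''):
--     if not arr:
--         return init + end
--     return init + before + (after + before).join(arr) + after + end
-- ===== Notes on version B (the rewrite author's own statement) =====
-- stated objective: idiomatic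
-- what changed: Replaces the per-item accumulation loop (before+item+after appended each iteration) with a single str.join using separator after+before, placing before/after only at the boundaries, with an explicit empty-list case.
import Mathlib
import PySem

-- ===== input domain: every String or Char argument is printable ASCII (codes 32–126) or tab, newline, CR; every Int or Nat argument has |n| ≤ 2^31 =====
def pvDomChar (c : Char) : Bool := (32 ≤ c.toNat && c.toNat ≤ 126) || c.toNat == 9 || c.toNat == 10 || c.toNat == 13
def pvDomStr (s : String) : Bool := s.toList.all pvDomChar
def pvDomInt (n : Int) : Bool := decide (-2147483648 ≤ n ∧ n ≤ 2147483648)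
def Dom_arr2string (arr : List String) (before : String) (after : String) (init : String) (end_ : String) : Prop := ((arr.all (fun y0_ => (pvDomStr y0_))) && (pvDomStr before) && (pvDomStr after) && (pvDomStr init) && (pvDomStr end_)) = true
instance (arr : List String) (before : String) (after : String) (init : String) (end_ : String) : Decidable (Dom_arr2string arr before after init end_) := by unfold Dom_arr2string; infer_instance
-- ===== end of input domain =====

-- B replaces A's per-item prefix/suffix accumulation loop by a single join with separator
-- after+before (objective: more idiomatic); same return value, no side effects involved.

-- ===== PORT A =====
def arr2string (arr : List String) (before : String) (after : String) (init : String) (end_ : String) : String :=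
  (arr.foldl (fun result item => result ++ (before ++ item ++ after)) init) ++ end_

-- ===== PORT B =====
def arr2string_alt (arr : List String) (before : String) (after : String) (init : String) (end_ : String) : String :=
  match arr with
  | [] => init ++ end_
  | _ :: _ => init ++ before ++ PySem.Str.join (after ++ before) arr ++ after ++ end_

-- ===== PRECONDITION & SPEC =====
def Spec_arr2string (arr : List String) (before : String) (after : String) (init : String) (end_ : String) (out : String) : Prop := out = arr2string_alt arr before after init end_
instance (arr : List String) (before : String) (after : String) (init : String) (end_ : String) (out : String) : Decidable (Spec_arr2string arr before after init end_ out) := by unfold Spec_arr2string; infer_instance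

-- ===== CLAIM (what is proved, stated in full; the proofs are below) =====
def Claim_equal_arr2string : Prop := ∀ (arr : List String) (before : String) (after : String) (init : String) (end_ : String), Dom_arr2string arr before after init end_ → Spec_arr2string arr before after init end_ (arr2string arr before after init end_)

-- ===== LEMMAS AND PROOFS =====

-- str.join on a singleton list is the element itself
theorem strJoin_singleton (sep p : String) : PySem.Str.join sep [p] = p := by
  rw [← String.toList_inj, PySem.Str.toList_join]
  simp [PySem.Chars.join_singleton]

-- str.join unfolding on a list with at least two elements
theorem strJoin_cons_cons (sep p q : String) (rest : List String) :
    PySem.Str.join sep (p :: q :: rest) = p ++ sep ++ PySem.Str.join sep (q :: rest) := by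
  rw [← String.toList_inj, PySem.Str.toList_join]
  simp [PySem.Chars.join_cons_cons, PySem.Str.toList_join]

-- A's loop pulls a prefix of its accumulator out front
theorem foldl_shift (before after : String) (l : List String) (s t : String) :
    l.foldl (fun r item => r ++ (before ++ item ++ after)) (s ++ t)
      = s ++ l.foldl (fun r item => r ++ (before ++ item ++ after)) t := by
  induction l generalizing t with
  | nil => rfl
  | cons x xs ih =>
      rw [List.foldl_cons, String.append_assoc]
      exact ih _

-- A's loop started at before ++ a ++ after equals the joined middle wrapped once
theorem foldl_eq_join (before after : String) (rest : List String) (a : String) :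
    rest.foldl (fun r item => r ++ (before ++ item ++ after)) (before ++ a ++ after)
      = before ++ PySem.Str.join (after ++ before) (a :: rest) ++ after := by
  induction rest generalizing a with
  | nil => simp [strJoin_singleton]
  | cons b bs ih =>
      rw [List.foldl_cons, foldl_shift, ih b, strJoin_cons_cons]
      simp [String.append_assoc]

-- ===== VERDICT (by name: the statement is the Claim_ definition above) =====
theorem arr2string_spec : Claim_equal_arr2string := by
  intro arr before after init end_ _
  unfold Spec_arr2string arr2string arr2string_alt
  cases arr with
  | nil => rfl
  | cons a rest =>
      rw [List.foldl_cons, foldl_shift, foldl_eq_join]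
      simp [String.append_assoc]
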